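-- pv_equiv track=rewrite | github.com/RenzPajarito08/auto-chess-cursor | vision/fen_builder.py | _rank_to_fen
-- ===== SOURCE A (Python) =====
-- from typing import List
-- from typing import List
--
-- def _rank_to_fen(rank: List[str]) -> str:
--     """
--     Convert one rank (list of 8 piece chars) to the FEN rank string.
--
--     Empty squares ``'.'`` are collapsed into digit counts.
--     """
--     fen_rank = ""
--     empty_count = 0
--
--     for char in rank:
--         if char == ".":
--             empty_count += 1
--         else:
--             if empty_count > 0:
--                 fen_rank += str(empty_count)
--                 empty_count = 0
--             fen_rank += char
--
--     if empty_count > 0: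
--         fen_rank += str(empty_count)
--
--     return fen_rank
-- ===== SOURCE B (Python) =====
-- from typing import List
--
--
-- def _rank_to_fen(rank: List[str]) -> str:
--     """Group the rank into maximal runs; dot-runs become their length, others join verbatim."""
--     parts = []
--     i = 0
--     n = len(rank)
--     while i < n:
--         j = i
--         while j < n and (rank[j] == ".") == (rank[i] == "."):
--             j += 1
--         if rank[i] == ".":
--             parts.append(str(j - i))
--         else:
--             parts.extend(rank[i:j])
--         i = j
--     return "".join(parts)
-- ===== Notes on version B (the rewrite author's own statement) =====
-- stated objective: idiomatic
-- what changed: Replaces A's running empty-counter with trailing-flush branch by a group-then-transform decomposition: split the rank into maximal runs of equal dot-ness, render each run (length for dot runs, verbatim join otherwise), and join the parts once.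
import Mathlib
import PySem

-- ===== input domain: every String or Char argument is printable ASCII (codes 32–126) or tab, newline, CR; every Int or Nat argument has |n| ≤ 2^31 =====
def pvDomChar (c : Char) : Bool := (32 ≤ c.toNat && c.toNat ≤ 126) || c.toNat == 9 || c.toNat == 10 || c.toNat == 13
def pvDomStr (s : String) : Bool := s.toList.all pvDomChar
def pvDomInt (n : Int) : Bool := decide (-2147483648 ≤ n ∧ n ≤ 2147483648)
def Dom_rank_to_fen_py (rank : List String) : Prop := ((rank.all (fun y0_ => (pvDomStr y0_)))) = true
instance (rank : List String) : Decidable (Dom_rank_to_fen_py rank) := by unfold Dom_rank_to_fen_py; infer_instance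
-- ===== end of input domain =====

-- B: group-then-transform decomposition (maximal runs) instead of A's running counter; same cost.
-- ===== PORT A =====
-- the for-loop over rank with state (fen_rank, empty_count); the final if is the [] case
def rankToFenGo : List String → String → Int → String
  | [], fen, cnt => if cnt > 0 then fen ++ PySem.Int.toStr cnt else fen
  | c :: rest, fen, cnt =>
    if c == "." then rankToFenGo rest fen (cnt + 1)
    else rankToFenGo rest ((if cnt > 0 then fen ++ PySem.Int.toStr cnt else fen) ++ c) 0

def rank_to_fen_py (rank : List String) : String := rankToFenGo rank "" 0

-- ===== PORT B =====
-- the outer while loop of Source B: each step takes the maximal run of equal dot-ness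
-- (the inner while j scan = takeWhile/dropWhile on the tail) and renders it as one/many parts
def rankRuns : List String → List String
  | [] => []
  | x :: xs =>
    let run := xs.takeWhile (fun y => ((y == ".") == (x == ".")))
    let rest := xs.dropWhile (fun y => ((y == ".") == (x == ".")))
    if x == "." then PySem.Int.toStr (1 + (run.length : Int)) :: rankRuns rest
    else (x :: run) ++ rankRuns rest
termination_by xs => xs.length
decreasing_by
  all_goals exact Nat.lt_succ_of_le (List.length_dropWhile_le _ xs)

def rank_to_fen_py_alt (rank : List String) : String := String.join (rankRuns rank)

-- ===== PRECONDITION & SPEC =====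
def Spec_rank_to_fen_py (rank : List String) (out : String) : Prop := out = rank_to_fen_py_alt rank
instance (rank : List String) (out : String) : Decidable (Spec_rank_to_fen_py rank out) := by unfold Spec_rank_to_fen_py; infer_instance

-- ===== CLAIM (what is proved, stated in full; the proofs are below) =====
def Claim_equal_rank_to_fen_py : Prop := ∀ (rank : List String), Dom_rank_to_fen_py rank → Spec_rank_to_fen_py rank (rank_to_fen_py rank)

-- ===== LEMMAS AND PROOFS =====

-- ===== VERDICT (by name: the statement is the Claim_ definition above) =====
-- String.join over a cons: fold-from-accumulator characterisation
theorem foldl_str_append (l : List String) : ∀ a : String, l.foldl (· ++ ·) a = a ++ l.foldl (· ++ ·) "" := by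
  induction l with
  | nil => intro a; simp [List.foldl]
  | cons x xs ih =>
    intro a
    simp only [List.foldl]
    rw [ih (a ++ x), ih ("" ++ x)]
    simp [String.append_assoc]

theorem join_cons (x : String) (xs : List String) :
    String.join (x :: xs) = x ++ String.join xs := by
  simp only [String.join, List.foldl]
  rw [foldl_str_append xs]
  simp

-- non-dot head peels off a single part
theorem rankRuns_cons_piece (x : String) (xs : List String) (hx : (x == ".") = false) :
    rankRuns (x :: xs) = x :: rankRuns xs := by
  rw [rankRuns]
  simp only [hx, Bool.false_eq_true, if_false]
  cases xs with
  | nil => simp [rankRuns]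
  | cons y ys =>
    by_cases hy : (y == ".") = true
    · simp [List.takeWhile, List.dropWhile, hy]
    · simp only [Bool.not_eq_true] at hy
      rw [rankRuns]
      simp [List.takeWhile, List.dropWhile, hy]

-- dot head absorbs the whole leading dot run
theorem rankRuns_cons_dot (x : String) (xs : List String) (hx : (x == ".") = true) :
    rankRuns (x :: xs) =
      PySem.Int.toStr (1 + ((xs.takeWhile (fun y => y == ".")).length : Int)) ::
        rankRuns (xs.dropWhile (fun y => y == ".")) := by
  rw [rankRuns]
  simp [hx]

-- the main invariant, cnt = 0 and cnt > 0 cases simultaneously, by strong induction on length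
theorem rankToFen_invariant :
    ∀ (n : ℕ) (xs : List String), xs.length ≤ n →
      (∀ fen, rankToFenGo xs fen 0 = fen ++ String.join (rankRuns xs)) ∧
      (∀ fen (cnt : Int), 0 < cnt →
        rankToFenGo xs fen cnt =
          fen ++ PySem.Int.toStr (cnt + ((xs.takeWhile (fun y => y == ".")).length : Int)) ++
            String.join (rankRuns (xs.dropWhile (fun y => y == ".")))) := by
  intro n
  induction n with
  | zero =>
    intro xs h
    have hxs : xs = [] := List.eq_nil_of_length_eq_zero (Nat.le_zero.mp h)
    subst hxs
    refine ⟨fun fen => ?_, fun fen cnt hcnt => ?_⟩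
    · rw [rankToFenGo, rankRuns]; simp [String.join]
    · rw [rankToFenGo]; simp only [List.takeWhile, List.dropWhile]
      rw [rankRuns]
      simp [String.join, hcnt]
  | succ n ih =>
    intro xs h
    cases xs with
    | nil => exact ih [] (Nat.zero_le n)
    | cons x rest =>
      have hlen : rest.length ≤ n := Nat.lt_succ_iff.mp (by simpa using h)
      by_cases hx : (x == ".") = true
      · -- x is a dot
        constructor
        · intro fen
          rw [rankToFenGo]
          simp only [hx, if_true]
          have h2 := (ih rest hlen).2 fen 1 (by omega)
          rw [show (0:Int) + 1 = 1 by ring, h2, rankRuns_cons_dot x rest hx, join_cons]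
          rw [String.append_assoc]
        · intro fen cnt hcnt
          rw [rankToFenGo]
          simp only [hx, if_true]
          have h2 := (ih rest hlen).2 fen (cnt + 1) (by omega)
          rw [h2]
          simp only [List.takeWhile, List.dropWhile, hx]
          have harg : cnt + 1 + ((rest.takeWhile (fun y => y == ".")).length : Int)
              = cnt + (((x :: rest.takeWhile (fun y => y == ".")).length : ℕ) : Int) := by
            simp only [List.length_cons]; push_cast; ring
          rw [harg]
      · -- x is a piece
        simp only [Bool.not_eq_true] at hx
        have hrun := rankRuns_cons_piece x rest hx
        constructor
        · intro fen
          rw [rankToFenGo]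
          simp only [hx, Bool.false_eq_true, if_false, lt_irrefl]
          rw [(ih rest hlen).1 (fen ++ x), hrun, join_cons]
          rw [String.append_assoc]
        · intro fen cnt hcnt
          rw [rankToFenGo]
          simp only [hx, Bool.false_eq_true, if_false, if_pos hcnt]
          rw [(ih rest hlen).1 (fen ++ PySem.Int.toStr cnt ++ x)]
          simp only [List.takeWhile, List.dropWhile, hx, hrun, join_cons]
          simp [String.append_assoc]

theorem rank_to_fen_py_spec : Claim_equal_rank_to_fen_py := by
  intro rank _
  show rank_to_fen_py rank = rank_to_fen_py_alt rank
  have := (rankToFen_invariant rank.length rank le_rfl).1 ""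
  simpa [rank_to_fen_py, rank_to_fen_py_alt] using this
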